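-- pv_equiv track=rewrite | github.com/alun-ai/mcp-alunai-clarity | clarity/autocode/session_analyzer.py | _categorize_command
-- ===== SOURCE A (Python) =====
-- def _categorize_command(command: str) -> str:
--     """Categorize a command by its purpose."""
--     command_lower = command.lower()
--
--     if any(cmd in command_lower for cmd in ["npm", "yarn", "pip", "cargo install"]):
--         return "install"
--     elif any(cmd in command_lower for cmd in ["test", "pytest", "jest"]):
--         return "test"
--     elif any(cmd in command_lower for cmd in ["build", "compile", "make"]):
--         return "build"
--     elif any(cmd in command_lower for cmd in ["git", "commit", "push", "pull"]):
--         return "git"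
--     elif any(cmd in command_lower for cmd in ["rm", "cp", "mv", "mkdir"]):
--         return "file_ops"
--     else:
--         return "other"
-- ===== SOURCE B (Python) =====
-- # Flat keyword->category pairs, listed from LOWEST to HIGHEST priority, so a
-- # single last-match-wins sweep (no early exit, no nested keyword groups)
-- # yields exactly the highest-priority matching category.
-- RANKED_KEYWORDS = [
--     ("rm", "file_ops"), ("cp", "file_ops"), ("mv", "file_ops"), ("mkdir", "file_ops"),
--     ("git", "git"), ("commit", "git"), ("push", "git"), ("pull", "git"),
--     ("build", "build"), ("compile", "build"), ("make", "build"),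
--     ("test", "test"), ("pytest", "test"), ("jest", "test"),
--     ("npm", "install"), ("yarn", "install"), ("pip", "install"), ("cargo install", "install"),
-- ]
--
--
-- def _categorize_command(command: str) -> str:
--     """Categorize a command by its purpose."""
--     command_lower = command.lower()
--     result = "other"
--     for kw, category in RANKED_KEYWORDS:
--         if kw in command_lower:
--             result = category
--     return result
-- ===== Notes on version B (the rewrite author's own statement) =====
-- stated objective: alternative
-- what changed: Replaced the prioritized first-match if/elif chain over nested keyword groups by a flat keyword-to-category pair list swept once from lowest to highest priority with a last-match-wins accumulator and no early exit.
import Mathlib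
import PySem

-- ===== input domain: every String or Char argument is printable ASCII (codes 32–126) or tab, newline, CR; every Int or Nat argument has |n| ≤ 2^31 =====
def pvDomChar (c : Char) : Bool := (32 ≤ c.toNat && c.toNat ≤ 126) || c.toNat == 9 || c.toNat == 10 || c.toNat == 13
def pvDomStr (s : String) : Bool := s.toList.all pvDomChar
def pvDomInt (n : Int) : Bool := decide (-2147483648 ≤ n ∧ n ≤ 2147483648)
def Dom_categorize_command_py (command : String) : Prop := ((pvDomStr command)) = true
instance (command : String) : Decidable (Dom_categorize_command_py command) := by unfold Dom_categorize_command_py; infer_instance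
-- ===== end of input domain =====

-- B replaces the prioritized first-match if/elif chain over nested keyword groups by a flat
-- keyword→category pair list swept once from lowest to highest priority, last match wins (alternative).

-- ===== PORT A =====
def categorize_command_py (command : String) : String :=
  let command_lower := PySem.Str.lower command
  if ["npm", "yarn", "pip", "cargo install"].any (fun cmd => PySem.Str.isIn cmd command_lower) then
    "install"
  else if ["test", "pytest", "jest"].any (fun cmd => PySem.Str.isIn cmd command_lower) then
    "test"
  else if ["build", "compile", "make"].any (fun cmd => PySem.Str.isIn cmd command_lower) then
    "build"
  else if ["git", "commit", "push", "pull"].any (fun cmd => PySem.Str.isIn cmd command_lower) then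
    "git"
  else if ["rm", "cp", "mv", "mkdir"].any (fun cmd => PySem.Str.isIn cmd command_lower) then
    "file_ops"
  else
    "other"

-- ===== PORT B =====
-- flat keyword→category pairs, lowest priority first
def pvRankedKeywords : List (String × String) :=
  [("rm", "file_ops"), ("cp", "file_ops"), ("mv", "file_ops"), ("mkdir", "file_ops"),
   ("git", "git"), ("commit", "git"), ("push", "git"), ("pull", "git"),
   ("build", "build"), ("compile", "build"), ("make", "build"),
   ("test", "test"), ("pytest", "test"), ("jest", "test"),
   ("npm", "install"), ("yarn", "install"), ("pip", "install"), ("cargo install", "install")]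

def categorize_command_py_alt (command : String) : String :=
  let command_lower := PySem.Str.lower command
  pvRankedKeywords.foldl
    (fun result p => if PySem.Str.isIn p.1 command_lower then p.2 else result) "other"

-- ===== PRECONDITION & SPEC =====
def Spec_categorize_command_py (command : String) (out : String) : Prop := out = categorize_command_py_alt command
instance (command : String) (out : String) : Decidable (Spec_categorize_command_py command out) := by unfold Spec_categorize_command_py; infer_instance

-- ===== CLAIM (what is proved, stated in full; the proofs are below) =====
def Claim_equal_categorize_command_py : Prop := ∀ (command : String), Dom_categorize_command_py command → Spec_categorize_command_py command (categorize_command_py command)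

-- ===== LEMMAS AND PROOFS =====

-- folding a same-category segment is one 'any' test
theorem pv_fold_segment (cl : String) (kws : List String) (cat b : String) :
    (kws.map (fun k => (k, cat))).foldl
      (fun result p => if PySem.Str.isIn p.1 cl then p.2 else result) b
    = if kws.any (fun k => PySem.Str.isIn k cl) then cat else b := by
  induction kws generalizing b with
  | nil => simp
  | cons k rest ih =>
      simp only [List.map, List.foldl, List.any_cons, ih]
      split_ifs with h1 h2 <;> simp_all
      obtain ⟨x, hx, ht⟩ := ‹∃ x ∈ rest, PySem.Chars.isIn x.toList cl.toList = true›
      exact absurd ht (by simp [h1 x hx])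

-- B's flat list is the concatenation of the five same-category segments
theorem pv_ranked_decomp :
    pvRankedKeywords
      = (["rm", "cp", "mv", "mkdir"].map (fun k => (k, "file_ops")))
        ++ (["git", "commit", "push", "pull"].map (fun k => (k, "git")))
        ++ (["build", "compile", "make"].map (fun k => (k, "build")))
        ++ (["test", "pytest", "jest"].map (fun k => (k, "test")))
        ++ (["npm", "yarn", "pip", "cargo install"].map (fun k => (k, "install"))) := by
  rfl

-- ===== VERDICT (by name: the statement is the Claim_ definition above) =====
theorem categorize_command_py_spec : Claim_equal_categorize_command_py := by
  intro command _
  unfold Spec_categorize_command_py categorize_command_py categorize_command_py_alt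
  rw [pv_ranked_decomp]
  simp only [List.foldl_append, pv_fold_segment]
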